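-- pv_equiv track=rewrite | github.com/Domantas1337/Bioinformatics_first_task | Pirma.py | find_start_stop_pairts
-- ===== SOURCE A (Python) =====
-- def find_start_stop_pairts(start_positions, stop_positions):
--
-- 	start_stop_pairs = []
-- 	last_codon_pair = (-1, -1)
--
-- 	current_stop_position_index = 0
--
-- 	valid_stop_postion = 0
-- 	change_stop_position = 0
-- 	for i in range(0, len(start_positions)):
-- 		for j in range(valid_stop_postion, len(stop_positions)):
-- 			if(start_positions[i] > stop_positions[j]):
-- 				change_stop_position = j + 1
-- 			elif (stop_positions[j] % 3 == start_positions[i] % 3):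
-- 				start_stop_pairs.append((start_positions[i], stop_positions[j]))
-- 				break
-- 	return start_stop_pairs
-- ===== SOURCE B (Python) =====
-- def find_start_stop_pairts(start_positions, stop_positions):
--     # Bucket stops by frame (pos % 3), keep prefix maxima; binary search the
--     # (nondecreasing) prefix-max list for the first same-frame stop >= start.
--     buckets = ([], [], [])
--     pmax = ([], [], [])
--     for s in stop_positions:
--         r = s % 3
--         p = pmax[r]
--         m = s if not p else (p[-1] if p[-1] > s else s)
--         buckets[r].append(s)
--         p.append(m)
--     out = []
--     for st in start_positions:
--         p = pmax[st % 3]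
--         lo, hi = 0, len(p)
--         while lo < hi:
--             mid = (lo + hi) // 2
--             if p[mid] < st:
--                 lo = mid + 1
--             else:
--                 hi = mid
--         if lo < len(p):
--             out.append((st, buckets[st % 3][lo]))
--     return out
-- ===== Notes on version B (the rewrite author's own statement) =====
-- stated objective: faster
-- what changed: Replaces A's per-start linear scan over all stops with a one-pass bucketing of stops by frame (pos % 3) plus prefix-maxima arrays, then a binary search per start for the first same-frame stop >= start.
import Mathlib
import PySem

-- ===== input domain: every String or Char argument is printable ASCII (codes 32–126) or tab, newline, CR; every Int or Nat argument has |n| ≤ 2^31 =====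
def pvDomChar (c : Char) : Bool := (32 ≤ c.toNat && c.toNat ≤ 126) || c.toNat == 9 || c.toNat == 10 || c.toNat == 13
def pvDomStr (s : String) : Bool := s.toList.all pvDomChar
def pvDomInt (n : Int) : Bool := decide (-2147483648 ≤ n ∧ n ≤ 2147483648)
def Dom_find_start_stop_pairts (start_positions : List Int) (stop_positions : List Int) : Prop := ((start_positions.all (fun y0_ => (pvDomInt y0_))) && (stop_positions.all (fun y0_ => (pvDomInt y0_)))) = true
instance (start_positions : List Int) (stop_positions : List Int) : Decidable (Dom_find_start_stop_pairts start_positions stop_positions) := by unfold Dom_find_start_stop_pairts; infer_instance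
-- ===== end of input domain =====

-- B buckets the stops by frame (pos % 3) with prefix maxima in one pass and binary-searches
-- per start instead of A's per-start linear scan over all stops; objective: faster.

-- ===== PORT A =====
-- inner 'for j' loop of A: j is the loop index, change mirrors A's dead variable
-- change_stop_position; returns (matched stop if the loop hit its break, final change).
def findStopA (st : Int) (stops : List Int) (j : Int) (change : Int) : Option Int × Int :=
  match stops with
  | [] => (none, change)
  | s :: rest =>
    if st > s then findStopA st rest (j + 1) (j + 1)
    else if PySem.Int.mod s 3 = PySem.Int.mod st 3 then (some s, change)
    else findStopA st rest (j + 1) change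

def find_start_stop_pairts (start_positions : List Int) (stop_positions : List Int) : List (Int × Int) :=
  (start_positions.foldl (fun acc st =>
      match findStopA st stop_positions 0 acc.2 with
      | (some s, ch) => (acc.1 ++ [(st, s)], ch)
      | (none, ch) => (acc.1, ch))
    (([] : List (Int × Int)), (0 : Int))).1

-- ===== PORT B =====
-- pmax.append(s if not pmax else (pmax[-1] if pmax[-1] > s else s))
def prefAppend (p : List Int) (s : Int) : List Int :=
  match p.getLast? with
  | none => p ++ [s]
  | some m => p ++ [if m > s then m else s]

-- _frame_index of Source B: the stops of frame r in order, plus their prefix maxima.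
def frameIndex (stops : List Int) (r : Int) : List Int × List Int :=
  stops.foldl (fun bp s =>
    if PySem.Int.mod s 3 = r then (bp.1 ++ [s], prefAppend bp.2 s) else bp)
    ([], [])

-- the 'while lo < hi' binary-search loop of Source B (indices are always in range,
-- so pmax[mid] is ported as getD).
def bsearchB (p : List Int) (x : Int) (lo hi : Nat) : Nat :=
  if lo < hi then
    let mid := (lo + hi) / 2
    if p.getD mid 0 < x then bsearchB p x (mid + 1) hi else bsearchB p x lo mid
  else lo
termination_by hi - lo
decreasing_by all_goals omega

def find_start_stop_pairts_alt (start_positions : List Int) (stop_positions : List Int) : List (Int × Int) :=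
  let f0 := frameIndex stop_positions 0
  let f1 := frameIndex stop_positions 1
  let f2 := frameIndex stop_positions 2
  start_positions.foldl (fun acc st =>
    let r := PySem.Int.mod st 3
    -- frames[st % 3]: st % 3 ∈ {0,1,2}
    let bp := if r = 0 then f0 else if r = 1 then f1 else f2
    let lo := bsearchB bp.2 st 0 bp.2.length
    if lo < bp.2.length then acc ++ [(st, bp.1.getD lo 0)] else acc) []

-- ===== PRECONDITION & SPEC =====
def Spec_find_start_stop_pairts (start_positions : List Int) (stop_positions : List Int) (out : List (Int × Int)) : Prop := out = find_start_stop_pairts_alt start_positions stop_positions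
instance (start_positions : List Int) (stop_positions : List Int) (out : List (Int × Int)) : Decidable (Spec_find_start_stop_pairts start_positions stop_positions out) := by unfold Spec_find_start_stop_pairts; infer_instance

-- ===== CLAIM (what is proved, stated in full; the proofs are below) =====
def Claim_equal_find_start_stop_pairts : Prop := ∀ (start_positions : List Int) (stop_positions : List Int), Dom_find_start_stop_pairts start_positions stop_positions → Spec_find_start_stop_pairts start_positions stop_positions (find_start_stop_pairts start_positions stop_positions)

-- ===== LEMMAS AND PROOFS =====

theorem pymod3 (a : Int) : PySem.Int.mod a 3 = a % 3 :=
  PySem.Int.mod_eq_emod_of_pos (by norm_num)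

-- the common specification: pair st with the first same-frame stop ≥ st
def frameOf (stops : List Int) (r : Int) : List Int :=
  stops.filter (fun s => decide (PySem.Int.mod s 3 = r))

def pairsOf (stops : List Int) (st : Int) : List (Int × Int) :=
  match (frameOf stops (PySem.Int.mod st 3)).find? (fun s => !decide (st > s)) with
  | some s => [(st, s)]
  | none => []

def pmaxOf (L : List Int) : List Int := L.foldl prefAppend []

-- ---- A-side ----
theorem findStopA_fst (st : Int) (stops : List Int) (j change : Int) :
    (findStopA st stops j change).1
      = stops.find? (fun s => !decide (st > s) && decide (PySem.Int.mod s 3 = PySem.Int.mod st 3)) := by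
  
  induction stops generalizing j change with
  | nil => rfl
  | cons s rest ih =>
    by_cases h1 : st > s
    · simp [findStopA, List.find?, h1, ih]
    · by_cases h2 : PySem.Int.mod s 3 = PySem.Int.mod st 3
      · rw [pymod3, pymod3] at h2
        simp [findStopA, List.find?, h1, h2]
      · rw [pymod3, pymod3] at h2
        simp [findStopA, List.find?, h1, h2, ih]

theorem find?_filter_fuse (l : List Int) (pb q : Int → Bool) :
    (l.filter pb).find? q = l.find? (fun s => q s && pb s) := by
  
  induction l with
  | nil => rfl
  | cons a t ih =>
    by_cases hp : pb a = true
    · by_cases hq : q a = true <;> simp [hp, hq, List.find?, ih]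
    · simp only [Bool.not_eq_true] at hp
      simp [hp, List.find?, ih]

theorem findA_flatMap (starts stops : List Int) :
    find_start_stop_pairts starts stops = starts.flatMap (pairsOf stops) := by
  
  have key : ∀ (l : List Int) (acc : List (Int × Int)) (ch : Int),
      (l.foldl (fun acc st =>
        match findStopA st stops 0 acc.2 with
        | (some s, ch) => (acc.1 ++ [(st, s)], ch)
        | (none, ch) => (acc.1, ch)) (acc, ch)).1 = acc ++ l.flatMap (pairsOf stops) := by
    intro l
    induction l with
    | nil => intro acc ch; simp
    | cons st t ih =>
      intro acc ch
      have hpair : pairsOf stops st = (match (findStopA st stops 0 ch).1 with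
          | some s => [(st, s)] | none => ([] : List (Int × Int))) := by
        rw [findStopA_fst]
        unfold pairsOf frameOf
        rw [find?_filter_fuse]
      rcases hA : findStopA st stops 0 ch with ⟨o, ch2⟩
      rw [hA] at hpair
      rw [List.foldl_cons]
      cases o with
      | some sv =>
        have hstep : (match findStopA st stops 0 (acc, ch).2 with
            | (some s, ch_1) => ((acc, ch).1 ++ [(st, s)], ch_1)
            | (none, ch_1) => ((acc, ch).1, ch_1)) = (acc ++ [(st, sv)], ch2) := by
          simp [hA]
        rw [hstep, ih]
        simp at hpair
        simp [hpair]
      | none =>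
        have hstep : (match findStopA st stops 0 (acc, ch).2 with
            | (some s, ch_1) => ((acc, ch).1 ++ [(st, s)], ch_1)
            | (none, ch_1) => ((acc, ch).1, ch_1)) = (acc, ch2) := by
          simp [hA]
        rw [hstep, ih]
        simp at hpair
        simp [hpair]
  have := key starts [] 0
  simpa [find_start_stop_pairts] using this

-- ---- B-side ----
theorem pmaxOf_snoc (L : List Int) (v : Int) :
    pmaxOf (L ++ [v]) = prefAppend (pmaxOf L) v := by
  simp [pmaxOf, List.foldl_append]

theorem frameIndex_eq (stops : List Int) (r : Int) :
    frameIndex stops r = (frameOf stops r, pmaxOf (frameOf stops r)) := by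
  
  have key : ∀ (l : List Int) (b : List Int),
      (l.foldl (fun bp s =>
        if PySem.Int.mod s 3 = r then (bp.1 ++ [s], prefAppend bp.2 s) else bp)
        (b, pmaxOf b)) = (b ++ frameOf l r, pmaxOf (b ++ frameOf l r)) := by
    intro l
    induction l with
    | nil => intro b; simp [frameOf]
    | cons s t ih =>
      intro b
      by_cases h : PySem.Int.mod s 3 = r
      · simp only [List.foldl_cons, if_pos h]
        rw [← pmaxOf_snoc, ih]
        have h' : s % 3 = r := by rw [← pymod3]; exact h
        simp [frameOf, h']
      · simp only [List.foldl_cons, if_neg h]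
        rw [ih]
        have h' : ¬ s % 3 = r := by rw [← pymod3]; exact h
        simp [frameOf, h']
  have := key stops []
  simpa [frameIndex, pmaxOf] using this

theorem getLast?_eq_getD (l : List Int) (h : l ≠ []) :
    l.getLast? = some (l.getD (l.length - 1) 0) := by
  have hl : l.length - 1 < l.length := by cases l <;> simp_all
  rw [List.getLast?_eq_getElem?, List.getElem?_eq_getElem hl]
  simp [List.getD, List.getElem?_eq_getElem hl]

theorem prefAppend_val (P : List Int) (s : Int) :
    ∃ v, prefAppend P s = P ++ [v] ∧ s ≤ v ∧
      (∀ m, P.getLast? = some m → m ≤ v ∧ (v = m ∨ v = s)) ∧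
      (P.getLast? = none → v = s) := by
  unfold prefAppend
  cases h : P.getLast? with
  | none => exact ⟨s, rfl, le_rfl, by simp, fun _ => rfl⟩
  | some m =>
    refine ⟨if m > s then m else s, rfl, by split <;> omega, ?_, by simp⟩
    intro m' hm'
    injection hm' with he
    subst he
    split <;> omega

theorem pmaxOf_length (L : List Int) : (pmaxOf L).length = L.length := by
  
  induction L using List.reverseRecOn with
  | nil => rfl
  | append_singleton L s ih =>
    rw [pmaxOf_snoc]
    unfold prefAppend
    cases h : (pmaxOf L).getLast? <;> simp [ih]

theorem pmaxOf_le (L : List Int) :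
    ∀ i : Nat, i < L.length → L.getD i 0 ≤ (pmaxOf L).getD i 0 := by
  induction L using List.reverseRecOn with
  | nil => intro i h; simp at h
  | append_singleton L s ih =>
    intro i h
    rw [pmaxOf_snoc]
    obtain ⟨v, hv, hsv, -, -⟩ := prefAppend_val (pmaxOf L) s
    rw [hv]
    have hlen := pmaxOf_length L
    simp only [List.length_append, List.length_cons, List.length_nil] at h
    rcases Nat.lt_or_ge i L.length with hi | hi
    · rw [List.getD_append _ _ _ _ hi, List.getD_append _ _ _ _ (by omega)]
      exact ih i hi
    · have hi' : i = L.length := by omega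
      subst hi'
      rw [List.getD_append_right _ _ _ _ (by omega), List.getD_append_right _ _ _ _ (by omega)]
      simp [hlen, hsv]

theorem pmaxOf_mono (L : List Int) :
    ∀ i j : Nat, i ≤ j → j < L.length → (pmaxOf L).getD i 0 ≤ (pmaxOf L).getD j 0 := by
  induction L using List.reverseRecOn with
  | nil => intro i j hij h; simp at h
  | append_singleton L s ih =>
    intro i j hij h
    rw [pmaxOf_snoc]
    obtain ⟨v, hv, hsv, hm, hnone⟩ := prefAppend_val (pmaxOf L) s
    rw [hv]
    have hlen := pmaxOf_length L
    simp only [List.length_append, List.length_cons, List.length_nil] at h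
    rcases Nat.lt_or_ge j L.length with hj | hj
    · rw [List.getD_append _ _ _ _ (by omega), List.getD_append _ _ _ _ (by omega)]
      exact ih i j hij hj
    · have hj' : j = L.length := by omega
      subst hj'
      rcases Nat.lt_or_ge i L.length with hi | hi
      · have hPne : pmaxOf L ≠ [] := by
          intro hc; rw [hc] at hlen; simp at hlen; omega
        obtain ⟨hmv, -⟩ := hm _ (getLast?_eq_getD _ hPne)
        have hstep : (pmaxOf L).getD i 0 ≤ (pmaxOf L).getD ((pmaxOf L).length - 1) 0 :=
          ih i ((pmaxOf L).length - 1) (by omega) (by omega)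
        rw [List.getD_append _ _ _ _ (by omega), List.getD_append_right _ _ _ _ (by omega)]
        simp only [hlen, Nat.sub_self, List.getD_cons_zero]
        exact le_trans hstep hmv
      · have hi' : i = L.length := by omega
        subst hi'
        exact le_rfl

theorem pmaxOf_first (L : List Int) (x : Int) :
    ∀ i : Nat, i < L.length → x ≤ (pmaxOf L).getD i 0 → (∀ k, k < i → (pmaxOf L).getD k 0 < x) →
    x ≤ L.getD i 0 := by
  induction L using List.reverseRecOn with
  | nil => intro i h; simp at h
  | append_singleton L s ih =>
    intro i h hx hbefore
    obtain ⟨v, hv, hsv, hm, hnone⟩ := prefAppend_val (pmaxOf L) s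
    rw [pmaxOf_snoc, hv] at hx hbefore
    have hlen := pmaxOf_length L
    simp only [List.length_append, List.length_cons, List.length_nil] at h
    rcases Nat.lt_or_ge i L.length with hi | hi
    · rw [List.getD_append _ _ _ _ (by omega)] at hx
      rw [List.getD_append _ _ _ _ hi]
      refine ih i hi hx (fun k hk => ?_)
      have := hbefore k hk
      rwa [List.getD_append _ _ _ _ (by omega)] at this
    · have hi' : i = L.length := by omega
      subst hi'
      rw [List.getD_append_right _ _ _ _ (by omega)] at hx
      simp only [hlen, Nat.sub_self, List.getD_cons_zero] at hx
      rw [List.getD_append_right _ _ _ _ (by omega), Nat.sub_self, List.getD_cons_zero]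
      cases hP : (pmaxOf L).getLast? with
      | none =>
        have := hnone hP
        omega
      | some m =>
        obtain ⟨hmv, hvm⟩ := hm _ hP
        rcases hvm with rfl | rfl
        · exfalso
          have hPne : pmaxOf L ≠ [] := by
            intro hc; rw [hc] at hP; simp at hP
          have hLpos : 0 < L.length := by
            rcases L with _ | _
            · simp [pmaxOf] at hPne
            · simp
          have hgl := getLast?_eq_getD _ hPne
          rw [hP] at hgl
          have : v = (pmaxOf L).getD ((pmaxOf L).length - 1) 0 := by injection hgl
          have hb := hbefore (L.length - 1) (by omega)
          rw [List.getD_append _ _ _ _ (by omega)] at hb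
          rw [hlen] at this
          omega
        · exact hx

theorem bsearchB_correct (p : List Int) (x : Int)
    (mono : ∀ i j : Nat, i ≤ j → j < p.length → p.getD i 0 ≤ p.getD j 0) :
    ∀ (n lo hi : Nat), hi - lo = n → lo ≤ hi → hi ≤ p.length →
    (∀ i, i < lo → p.getD i 0 < x) → (∀ i, hi ≤ i → i < p.length → x ≤ p.getD i 0) →
    bsearchB p x lo hi ≤ p.length ∧ (∀ i, i < bsearchB p x lo hi → p.getD i 0 < x) ∧
      (bsearchB p x lo hi < p.length → x ≤ p.getD (bsearchB p x lo hi) 0) := by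
  
  intro n
  induction n using Nat.strong_induction_on with
  | _ n ihn =>
    intro lo hi hn hlohi hhilen hlow hhigh
    rw [bsearchB]
    by_cases hlt : lo < hi
    · simp only [if_pos hlt]
      have hmid1 : lo ≤ (lo + hi) / 2 := by omega
      have hmid2 : (lo + hi) / 2 < hi := by omega
      by_cases hc : p.getD ((lo + hi) / 2) 0 < x
      · simp only [if_pos hc]
        exact ihn (hi - ((lo + hi) / 2 + 1)) (by omega) ((lo + hi) / 2 + 1) hi rfl (by omega)
          hhilen (fun i hi2 => lt_of_le_of_lt (mono i ((lo + hi) / 2) (by omega) (by omega)) hc)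
          hhigh
      · simp only [if_neg hc]
        exact ihn ((lo + hi) / 2 - lo) (by omega) lo ((lo + hi) / 2) rfl (by omega) (by omega)
          hlow (fun i hge hilen => le_trans (by omega) (mono ((lo + hi) / 2) i hge hilen))
    · simp only [if_neg hlt]
      have hle : hi ≤ lo := by omega
      exact ⟨by omega, hlow, fun hlen => hhigh lo (by omega) hlen⟩

theorem find?_at (l : List Int) (q : Int → Bool) (r : Nat) (hr : r < l.length)
    (hbefore : ∀ i, i < r → q (l.getD i 0) = false) (hat : q (l.getD r 0) = true) :
    l.find? q = some (l.getD r 0) := by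
  
  induction l generalizing r with
  | nil => simp at hr
  | cons a t ih =>
    cases r with
    | zero =>
      simp only [List.getD_cons_zero] at hat
      simp [List.find?, hat]
    | succ r' =>
      have h0 : q a = false := by
        have := hbefore 0 (Nat.succ_pos r')
        simpa using this
      simp only [List.find?, h0]
      simp only [List.length_cons, Nat.succ_lt_succ_iff] at hr
      have := ih r' hr (fun i hi => by
        have := hbefore (i + 1) (Nat.succ_lt_succ hi)
        simpa using this) (by simpa using hat)
      simpa using this

theorem find?_none_of (l : List Int) (q : Int → Bool)
    (hall : ∀ i, i < l.length → q (l.getD i 0) = false) : l.find? q = none := by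
  
  induction l with
  | nil => rfl
  | cons a t ih =>
    have h0 : q a = false := by
      have := hall 0 (by simp)
      simpa using this
    simp only [List.find?, h0]
    exact ih (fun i hi => by
      have := hall (i + 1) (by simpa using Nat.succ_lt_succ hi)
      simpa using this)

theorem modst_bounds (st : Int) : 0 ≤ PySem.Int.mod st 3 ∧ PySem.Int.mod st 3 < 3 := by
  rw [pymod3]
  exact ⟨Int.emod_nonneg st (by norm_num), Int.emod_lt_of_pos st (by norm_num)⟩

theorem frameSelect (stops : List Int) (r : Int) (h0 : 0 ≤ r) (h3 : r < 3) :
    (if r = 0 then frameIndex stops 0 else if r = 1 then frameIndex stops 1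
     else frameIndex stops 2) = frameIndex stops r := by
  have : r = 0 ∨ r = 1 ∨ r = 2 := by omega
  rcases this with rfl | rfl | rfl <;> simp

theorem perStart (stops : List Int) (st : Int) :
    (if bsearchB (frameIndex stops (PySem.Int.mod st 3)).2 st 0
          (frameIndex stops (PySem.Int.mod st 3)).2.length
        < (frameIndex stops (PySem.Int.mod st 3)).2.length
     then [(st, (frameIndex stops (PySem.Int.mod st 3)).1.getD
          (bsearchB (frameIndex stops (PySem.Int.mod st 3)).2 st 0
            (frameIndex stops (PySem.Int.mod st 3)).2.length) 0)]
     else ([] : List (Int × Int))) = pairsOf stops st := by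
  rw [frameIndex_eq]
  set F := frameOf stops (PySem.Int.mod st 3) with hF
  set P := pmaxOf F with hP
  have hlen : P.length = F.length := pmaxOf_length F
  obtain ⟨h1, h2, h3⟩ := bsearchB_correct P st
    (fun i j hij hj => by
      rw [hP] at hj ⊢
      exact pmaxOf_mono F i j hij (by rwa [pmaxOf_length] at hj)) P.length 0 P.length rfl
    (Nat.zero_le _) le_rfl
    (fun i hi => absurd hi (Nat.not_lt_zero i))
    (fun i hge hlt => absurd (lt_of_le_of_lt hge hlt) (lt_irrefl _))
  set lo := bsearchB P st 0 P.length with hlo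
  simp only
  by_cases hlt : lo < P.length
  · rw [if_pos hlt]
    have hatP : st ≤ P.getD lo 0 := h3 hlt
    have hatF : st ≤ F.getD lo 0 := by
      refine pmaxOf_first F st lo (by omega) ?_ ?_
      · rwa [← hP]
      · intro k hk
        rw [← hP]
        exact h2 k hk
    have hfind := find?_at F (fun s => !decide (st > s)) lo (by omega)
      (fun i hi => by
        have hPi := h2 i hi
        have hFi : F.getD i 0 < st := by
          refine lt_of_le_of_lt ?_ hPi
          rw [hP]
          exact pmaxOf_le F i (by omega)
        simp only [Bool.not_eq_false', decide_eq_true_eq]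
        omega)
      (by simp only [Bool.not_eq_true', decide_eq_false_iff_not]; omega)
    unfold pairsOf
    rw [← hF, hfind]
  · rw [if_neg hlt]
    have hfind := find?_none_of F (fun s => !decide (st > s)) (fun i hi => by
      have hPi := h2 i (by omega)
      have hFi : F.getD i 0 < st := by
        refine lt_of_le_of_lt ?_ hPi
        rw [hP]
        exact pmaxOf_le F i hi
      simp only [Bool.not_eq_false', decide_eq_true_eq]
      omega)
    unfold pairsOf
    rw [← hF, hfind]

theorem findB_flatMap (starts stops : List Int) :
    find_start_stop_pairts_alt starts stops = starts.flatMap (pairsOf stops) := by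
  
  have key : ∀ (l : List Int) (acc : List (Int × Int)),
      l.foldl (fun acc st =>
        let r := PySem.Int.mod st 3
        let bp := if r = 0 then frameIndex stops 0 else if r = 1 then frameIndex stops 1
          else frameIndex stops 2
        let lo := bsearchB bp.2 st 0 bp.2.length
        if lo < bp.2.length then acc ++ [(st, bp.1.getD lo 0)] else acc) acc
      = acc ++ l.flatMap (pairsOf stops) := by
    intro l
    induction l with
    | nil => intro acc; simp
    | cons st t ih =>
      intro acc
      rw [List.foldl_cons]
      have hsel := frameSelect stops (PySem.Int.mod st 3) (modst_bounds st).1 (modst_bounds st).2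
      have hstep : (let r := PySem.Int.mod st 3
          let bp := if r = 0 then frameIndex stops 0 else if r = 1 then frameIndex stops 1
            else frameIndex stops 2
          let lo := bsearchB bp.2 st 0 bp.2.length
          if lo < bp.2.length then acc ++ [(st, bp.1.getD lo 0)] else acc)
          = acc ++ pairsOf stops st := by
        simp only [hsel, ← perStart stops st]
        by_cases hc : bsearchB (frameIndex stops (PySem.Int.mod st 3)).2 st 0
            (frameIndex stops (PySem.Int.mod st 3)).2.length
            < (frameIndex stops (PySem.Int.mod st 3)).2.length
        · rw [if_pos hc, if_pos hc]
        · rw [if_neg hc, if_neg hc]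
          simp
      rw [hstep, ih]
      simp
  have := key starts []
  simpa [find_start_stop_pairts_alt] using this

-- ===== VERDICT (by name: the statement is the Claim_ definition above) =====
theorem find_start_stop_pairts_spec : Claim_equal_find_start_stop_pairts := by
  intro starts stops _
  unfold Spec_find_start_stop_pairts
  rw [findA_flatMap, findB_flatMap]
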